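-- pv_equiv track=rewrite | github.com/SangamNishad13/PMS-reporting-tool | tools/min_brace_balance.py | compute
-- ===== SOURCE A (Python) =====
-- def compute(js):
--     i=0; L=len(js)
--     count=0
--     events=[]
--     while i<L:
--         c=js[i]
--         if c in ('"', "'", '`'):
--             q=c; i+=1
--             while i<L:
--                 if js[i]=='\\': i+=2; continue
--                 if js[i]==q: i+=1; break
--                 i+=1
--             continue
--         if c=='/' and i+1<L and js[i+1]=='/':
--             i+=2
--             while i<L and js[i]!='\n': i+=1
--             continue
--         if c=='/' and i+1<L and js[i+1]=='*':
--             i+=2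
--             while i+1<L and not (js[i]=='*' and js[i+1]=='/'): i+=1
--             i+=2
--             continue
--         if c=='{': count+=1; events.append((i,'{',count))
--         elif c=='}': count-=1; events.append((i,'}',count))
--         i+=1
--     return events
-- ===== SOURCE B (Python) =====
-- def compute(js):
--     # Flat finite-state machine: one pass, one index increment per iteration.
--     NORMAL, STRING, LINE, BLOCK = 0, 1, 2, 3
--     state = NORMAL
--     quote = ''
--     esc = False
--     star = False
--     i = 0
--     L = len(js)
--     count = 0
--     events = []
--     while i < L:
--         c = js[i]
--         if state == NORMAL:
--             if c in ('"', "'", '`'):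
--                 state = STRING; quote = c; esc = False
--             elif c == '/' and i + 1 < L and js[i + 1] == '/':
--                 state = LINE; i += 2; continue
--             elif c == '/' and i + 1 < L and js[i + 1] == '*':
--                 state = BLOCK; star = False; i += 2; continue
--             elif c == '{':
--                 count += 1; events.append((i, '{', count))
--             elif c == '}':
--                 count -= 1; events.append((i, '}', count))
--         elif state == STRING:
--             if esc:
--                 esc = False
--             elif c == '\\':
--                 esc = True
--             elif c == quote:
--                 state = NORMAL
--         elif state == LINE:
--             if c == '\n':
--                 state = NORMAL
--         else:  # BLOCK
--             if star and c == '/':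
--                 state = NORMAL
--             else:
--                 star = (c == '*')
--         i += 1
--     return events
-- ===== Notes on version B (the rewrite author's own statement) =====
-- stated objective: alternative
-- what changed: A's nested skip-ahead while-loops (separate inner loops for strings, line comments, block comments, with i+=2 jumps) are replaced by a single flat finite-state machine that advances i by exactly one per iteration, carrying state NORMAL/STRING/LINE/BLOCK plus a quote char, an escape flag and a star flag.
import Mathlib
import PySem

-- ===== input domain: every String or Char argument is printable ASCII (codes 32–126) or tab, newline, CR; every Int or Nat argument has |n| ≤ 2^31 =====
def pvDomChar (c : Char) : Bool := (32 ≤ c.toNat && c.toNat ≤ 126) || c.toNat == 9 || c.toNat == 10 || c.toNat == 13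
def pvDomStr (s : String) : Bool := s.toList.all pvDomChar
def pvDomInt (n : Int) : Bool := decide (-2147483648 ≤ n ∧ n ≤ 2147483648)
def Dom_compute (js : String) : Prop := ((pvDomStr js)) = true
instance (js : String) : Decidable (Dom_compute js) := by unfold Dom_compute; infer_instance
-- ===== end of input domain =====

-- B replaces A's nested skip-ahead loops by a flat one-char-per-step state machine; same O(n) cost, different decomposition.
-- All loops carry a fuel argument as a pure totality guard (fuel = length+1 always suffices since the index strictly grows).

-- ===== PORT A =====
-- A's inner string-skipping loop: from index i, skip escaped pairs, stop just past the closing quote.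
def aStr (cs : List Char) (q : Char) : Nat → Nat → Nat
  | 0, i => i
  | fuel + 1, i =>
    if i < cs.length then
      if cs.getD i ' ' = '\\' then aStr cs q fuel (i + 2)
      else if cs.getD i ' ' = q then i + 1
      else aStr cs q fuel (i + 1)
    else i

-- A's line-comment loop: stop at the '\n' (or at end).
def aLine (cs : List Char) : Nat → Nat → Nat
  | 0, i => i
  | fuel + 1, i =>
    if i < cs.length ∧ cs.getD i ' ' ≠ '\n' then aLine cs fuel (i + 1) else i

-- A's block-comment loop: stop at the index of the '*' of the terminator '*/' (or where i+1 runs out).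
def aBlockScan (cs : List Char) : Nat → Nat → Nat
  | 0, i => i
  | fuel + 1, i =>
    if i + 1 < cs.length ∧ ¬(cs.getD i ' ' = '*' ∧ cs.getD (i + 1) ' ' = '/') then
      aBlockScan cs fuel (i + 1)
    else i

-- A's main loop.
def aMain (cs : List Char) : Nat → Nat → Int → List (Int × String × Int) → List (Int × String × Int)
  | 0, _, _, events => events
  | fuel + 1, i, count, events =>
    if i < cs.length then
      let c := cs.getD i ' '
      if c = '"' ∨ c = '\'' ∨ c = '`' then
        aMain cs fuel (aStr cs c (cs.length + 1) (i + 1)) count events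
      else if c = '/' ∧ i + 1 < cs.length ∧ cs.getD (i + 1) ' ' = '/' then
        aMain cs fuel (aLine cs (cs.length + 1) (i + 2)) count events
      else if c = '/' ∧ i + 1 < cs.length ∧ cs.getD (i + 1) ' ' = '*' then
        aMain cs fuel (aBlockScan cs (cs.length + 1) (i + 2) + 2) count events
      else if c = '{' then
        aMain cs fuel (i + 1) (count + 1) (events ++ [((i : Int), "{", count + 1)])
      else if c = '}' then
        aMain cs fuel (i + 1) (count - 1) (events ++ [((i : Int), "}", count - 1)])
      else
        aMain cs fuel (i + 1) count events
    else events

def compute (js : String) : List (Int × String × Int) :=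
  aMain js.toList (js.toList.length + 1) 0 0 []

-- ===== PORT B =====
-- B's scanner state: normal code, inside a string (quote char, escape flag),
-- line comment, or block comment (star = previous comment char was '*').
inductive ScanState where
  | normal : ScanState
  | str : Char → Bool → ScanState
  | line : ScanState
  | block : Bool → ScanState

-- B's single flat loop: one index step per iteration, driven by the state.
def bLoop (cs : List Char) : Nat → Nat → Int → List (Int × String × Int) → ScanState → List (Int × String × Int)
  | 0, _, _, events, _ => events
  | fuel + 1, i, count, events, st =>
    if i < cs.length then
      let c := cs.getD i ' '
      match st with
      | .normal =>
        if c = '"' ∨ c = '\'' ∨ c = '`' then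
          bLoop cs fuel (i + 1) count events (.str c false)
        else if c = '/' ∧ i + 1 < cs.length ∧ cs.getD (i + 1) ' ' = '/' then
          bLoop cs fuel (i + 2) count events .line
        else if c = '/' ∧ i + 1 < cs.length ∧ cs.getD (i + 1) ' ' = '*' then
          bLoop cs fuel (i + 2) count events (.block false)
        else if c = '{' then
          bLoop cs fuel (i + 1) (count + 1) (events ++ [((i : Int), "{", count + 1)]) .normal
        else if c = '}' then
          bLoop cs fuel (i + 1) (count - 1) (events ++ [((i : Int), "}", count - 1)]) .normal
        else
          bLoop cs fuel (i + 1) count events .normal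
      | .str q esc =>
        if esc then bLoop cs fuel (i + 1) count events (.str q false)
        else if c = '\\' then bLoop cs fuel (i + 1) count events (.str q true)
        else if c = q then bLoop cs fuel (i + 1) count events .normal
        else bLoop cs fuel (i + 1) count events (.str q false)
      | .line =>
        if c = '\n' then bLoop cs fuel (i + 1) count events .normal
        else bLoop cs fuel (i + 1) count events .line
      | .block star =>
        if star = true ∧ c = '/' then bLoop cs fuel (i + 1) count events .normal
        else bLoop cs fuel (i + 1) count events (.block (c = '*'))
    else events

def compute_alt (js : String) : List (Int × String × Int) :=
  bLoop js.toList (js.toList.length + 1) 0 0 [] .normal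

-- ===== PRECONDITION & SPEC =====
def Spec_compute (js : String) (out : List (Int × String × Int)) : Prop := out = compute_alt js
instance (js : String) (out : List (Int × String × Int)) : Decidable (Spec_compute js out) := by unfold Spec_compute; infer_instance

-- ===== CLAIM (what is proved, stated in full; the proofs are below) =====
def Claim_equal_compute : Prop := ∀ (js : String), Dom_compute js → Spec_compute js (compute js)

-- ===== LEMMAS AND PROOFS =====

-- Fuel-free (well-founded) versions of the five loops, used only by the proofs.
def aStrW (cs : List Char) (q : Char) (i : Nat) : Nat :=
  if i < cs.length then
    if cs.getD i ' ' = '\\' then aStrW cs q (i + 2)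
    else if cs.getD i ' ' = q then i + 1
    else aStrW cs q (i + 1)
  else i
termination_by cs.length - i

def aLineW (cs : List Char) (i : Nat) : Nat :=
  if i < cs.length ∧ cs.getD i ' ' ≠ '\n' then aLineW cs (i + 1) else i
termination_by cs.length - i
decreasing_by omega

def aBlockScanW (cs : List Char) (i : Nat) : Nat :=
  if i + 1 < cs.length ∧ ¬(cs.getD i ' ' = '*' ∧ cs.getD (i + 1) ' ' = '/') then
    aBlockScanW cs (i + 1)
  else i
termination_by cs.length - i
decreasing_by omega

theorem aStrW_ge (cs : List Char) (q : Char) (i : Nat) : i ≤ aStrW cs q i := by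
  rw [aStrW]
  split
  · split
    · have := aStrW_ge cs q (i + 2); omega
    · split
      · omega
      · have := aStrW_ge cs q (i + 1); omega
  · omega
termination_by cs.length - i

theorem aLineW_ge (cs : List Char) (i : Nat) : i ≤ aLineW cs i := by
  rw [aLineW]
  split
  · have := aLineW_ge cs (i + 1); omega
  · omega
termination_by cs.length - i
decreasing_by omega

theorem aBlockScanW_ge (cs : List Char) (i : Nat) : i ≤ aBlockScanW cs i := by
  rw [aBlockScanW]
  split
  · have := aBlockScanW_ge cs (i + 1); omega
  · omega
termination_by cs.length - i
decreasing_by omega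

def aMainW (cs : List Char) (i : Nat) (count : Int)
    (events : List (Int × String × Int)) : List (Int × String × Int) :=
  if _h : i < cs.length then
    let c := cs.getD i ' '
    if c = '"' ∨ c = '\'' ∨ c = '`' then
      aMainW cs (aStrW cs c (i + 1)) count events
    else if c = '/' ∧ i + 1 < cs.length ∧ cs.getD (i + 1) ' ' = '/' then
      aMainW cs (aLineW cs (i + 2)) count events
    else if c = '/' ∧ i + 1 < cs.length ∧ cs.getD (i + 1) ' ' = '*' then
      aMainW cs (aBlockScanW cs (i + 2) + 2) count events
    else if c = '{' then
      aMainW cs (i + 1) (count + 1) (events ++ [((i : Int), "{", count + 1)])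
    else if c = '}' then
      aMainW cs (i + 1) (count - 1) (events ++ [((i : Int), "}", count - 1)])
    else
      aMainW cs (i + 1) count events
  else events
termination_by cs.length - i
decreasing_by
  · have := aStrW_ge cs (cs.getD i ' ') (i + 1); omega
  · have := aLineW_ge cs (i + 2); omega
  · have := aBlockScanW_ge cs (i + 2); omega
  · omega
  · omega
  · omega

def bLoopW (cs : List Char) (i : Nat) (count : Int)
    (events : List (Int × String × Int)) (st : ScanState) : List (Int × String × Int) :=
  if _h : i < cs.length then
    let c := cs.getD i ' '
    match st with
    | .normal =>
      if c = '"' ∨ c = '\'' ∨ c = '`' then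
        bLoopW cs (i + 1) count events (.str c false)
      else if c = '/' ∧ i + 1 < cs.length ∧ cs.getD (i + 1) ' ' = '/' then
        bLoopW cs (i + 2) count events .line
      else if c = '/' ∧ i + 1 < cs.length ∧ cs.getD (i + 1) ' ' = '*' then
        bLoopW cs (i + 2) count events (.block false)
      else if c = '{' then
        bLoopW cs (i + 1) (count + 1) (events ++ [((i : Int), "{", count + 1)]) .normal
      else if c = '}' then
        bLoopW cs (i + 1) (count - 1) (events ++ [((i : Int), "}", count - 1)]) .normal
      else
        bLoopW cs (i + 1) count events .normal
    | .str q esc =>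
      if esc then bLoopW cs (i + 1) count events (.str q false)
      else if c = '\\' then bLoopW cs (i + 1) count events (.str q true)
      else if c = q then bLoopW cs (i + 1) count events .normal
      else bLoopW cs (i + 1) count events (.str q false)
    | .line =>
      if c = '\n' then bLoopW cs (i + 1) count events .normal
      else bLoopW cs (i + 1) count events .line
    | .block star =>
      if star = true ∧ c = '/' then bLoopW cs (i + 1) count events .normal
      else bLoopW cs (i + 1) count events (.block (c = '*'))
  else events
termination_by cs.length - i
decreasing_by all_goals omega

-- fuel adequacy: with fuel ≥ remaining length, the fuelled loops equal the fuel-free ones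
theorem aStrW_stop (cs : List Char) (q : Char) (i : Nat) (h : cs.length ≤ i) :
    aStrW cs q i = i := by
  rw [aStrW]; simp [Nat.not_lt.2 h]

theorem aLineW_stop (cs : List Char) (i : Nat) (h : cs.length ≤ i) :
    aLineW cs i = i := by
  rw [aLineW]; simp [Nat.not_lt.2 h]

theorem aBlockScanW_stop (cs : List Char) (i : Nat) (h : cs.length ≤ i + 1) :
    aBlockScanW cs i = i := by
  rw [aBlockScanW]; simp [Nat.not_lt.2 h]

theorem aMainW_stop (cs : List Char) (i : Nat) (count : Int)
    (events : List (Int × String × Int)) (h : cs.length ≤ i) :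
    aMainW cs i count events = events := by
  rw [aMainW]; simp [Nat.not_lt.2 h]

theorem bLoopW_stop (cs : List Char) (i : Nat) (count : Int)
    (events : List (Int × String × Int)) (st : ScanState) (h : cs.length ≤ i) :
    bLoopW cs i count events st = events := by
  rw [bLoopW]; simp [Nat.not_lt.2 h]

theorem aStr_eq (cs : List Char) (q : Char) :
    ∀ (fuel i : Nat), cs.length ≤ i + fuel → aStr cs q fuel i = aStrW cs q i := by
  intro fuel
  induction fuel with
  | zero =>
    intro i h
    rw [aStr, aStrW_stop cs q i (by omega)]
  | succ fuel ih =>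
    intro i h
    rw [aStr, aStrW]
    by_cases h0 : i < cs.length
    · rw [if_pos h0, if_pos h0]
      by_cases h1 : cs.getD i ' ' = '\\'
      · rw [if_pos h1, if_pos h1, ih (i + 2) (by omega)]
      · rw [if_neg h1, if_neg h1]
        by_cases h2 : cs.getD i ' ' = q
        · rw [if_pos h2, if_pos h2]
        · rw [if_neg h2, if_neg h2, ih (i + 1) (by omega)]
    · rw [if_neg h0, if_neg h0]

theorem aLine_eq (cs : List Char) :
    ∀ (fuel i : Nat), cs.length ≤ i + fuel → aLine cs fuel i = aLineW cs i := by
  intro fuel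
  induction fuel with
  | zero =>
    intro i h
    rw [aLine, aLineW_stop cs i (by omega)]
  | succ fuel ih =>
    intro i h
    rw [aLine, aLineW]
    by_cases h0 : i < cs.length ∧ cs.getD i ' ' ≠ '\n'
    · rw [if_pos h0, if_pos h0, ih (i + 1) (by omega)]
    · rw [if_neg h0, if_neg h0]

theorem aBlockScan_eq (cs : List Char) :
    ∀ (fuel i : Nat), cs.length ≤ i + fuel → aBlockScan cs fuel i = aBlockScanW cs i := by
  intro fuel
  induction fuel with
  | zero =>
    intro i h
    rw [aBlockScan, aBlockScanW_stop cs i (by omega)]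
  | succ fuel ih =>
    intro i h
    rw [aBlockScan, aBlockScanW]
    by_cases h0 : i + 1 < cs.length ∧ ¬(cs.getD i ' ' = '*' ∧ cs.getD (i + 1) ' ' = '/')
    · rw [if_pos h0, if_pos h0, ih (i + 1) (by omega)]
    · rw [if_neg h0, if_neg h0]

theorem aMain_eq (cs : List Char) :
    ∀ (fuel i : Nat) (count : Int) (events : List (Int × String × Int)),
      cs.length ≤ i + fuel → aMain cs fuel i count events = aMainW cs i count events := by
  intro fuel
  induction fuel with
  | zero =>
    intro i count events h
    rw [aMain, aMainW_stop cs i count events (by omega)]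
  | succ fuel ih =>
    intro i count events h
    rw [aMain, aMainW]
    by_cases h0 : i < cs.length
    case neg => rw [if_neg h0, dif_neg h0]
    case pos =>
    rw [if_pos h0, dif_pos h0]
    set c := cs.getD i ' ' with hc
    by_cases h1 : c = '"' ∨ c = '\'' ∨ c = '`'
    · rw [if_pos h1, if_pos h1, aStr_eq cs c (cs.length + 1) (i + 1) (by omega)]
      exact ih _ count events (by have := aStrW_ge cs c (i + 1); omega)
    · rw [if_neg h1, if_neg h1]
      by_cases h2 : c = '/' ∧ i + 1 < cs.length ∧ cs.getD (i + 1) ' ' = '/'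
      · rw [if_pos h2, if_pos h2, aLine_eq cs (cs.length + 1) (i + 2) (by omega)]
        exact ih _ count events (by have := aLineW_ge cs (i + 2); omega)
      · rw [if_neg h2, if_neg h2]
        by_cases h3 : c = '/' ∧ i + 1 < cs.length ∧ cs.getD (i + 1) ' ' = '*'
        · rw [if_pos h3, if_pos h3, aBlockScan_eq cs (cs.length + 1) (i + 2) (by omega)]
          exact ih _ count events (by have := aBlockScanW_ge cs (i + 2); omega)
        · rw [if_neg h3, if_neg h3]
          by_cases h4 : c = '{'
          · rw [if_pos h4, if_pos h4]
            exact ih _ _ _ (by omega)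
          · rw [if_neg h4, if_neg h4]
            by_cases h5 : c = '}'
            · rw [if_pos h5, if_pos h5]
              exact ih _ _ _ (by omega)
            · rw [if_neg h5, if_neg h5]
              exact ih _ _ _ (by omega)

theorem bLoop_eq (cs : List Char) :
    ∀ (fuel i : Nat) (count : Int) (events : List (Int × String × Int)) (st : ScanState),
      cs.length ≤ i + fuel → bLoop cs fuel i count events st = bLoopW cs i count events st := by
  intro fuel
  induction fuel with
  | zero =>
    intro i count events st h
    rw [bLoop, bLoopW_stop cs i count events st (by omega)]
  | succ fuel ih =>
    intro i count events st h
    rw [bLoop, bLoopW]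
    by_cases h0 : i < cs.length
    case neg => rw [if_neg h0, dif_neg h0]
    case pos =>
    rw [if_pos h0, dif_pos h0]
    cases st with
    | normal =>
      simp only
      set c := cs.getD i ' ' with hc
      by_cases h1 : c = '"' ∨ c = '\'' ∨ c = '`'
      · rw [if_pos h1, if_pos h1, ih _ _ _ _ (by omega)]
      · rw [if_neg h1, if_neg h1]
        by_cases h2 : c = '/' ∧ i + 1 < cs.length ∧ cs.getD (i + 1) ' ' = '/'
        · rw [if_pos h2, if_pos h2, ih _ _ _ _ (by omega)]
        · rw [if_neg h2, if_neg h2]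
          by_cases h3 : c = '/' ∧ i + 1 < cs.length ∧ cs.getD (i + 1) ' ' = '*'
          · rw [if_pos h3, if_pos h3, ih _ _ _ _ (by omega)]
          · rw [if_neg h3, if_neg h3]
            by_cases h4 : c = '{'
            · rw [if_pos h4, if_pos h4, ih _ _ _ _ (by omega)]
            · rw [if_neg h4, if_neg h4]
              by_cases h5 : c = '}'
              · rw [if_pos h5, if_pos h5, ih _ _ _ _ (by omega)]
              · rw [if_neg h5, if_neg h5, ih _ _ _ _ (by omega)]
    | str q esc =>
      simp only
      by_cases h1 : esc = true
      · rw [if_pos h1, if_pos h1, ih _ _ _ _ (by omega)]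
      · rw [if_neg h1, if_neg h1]
        by_cases h2 : cs.getD i ' ' = '\\'
        · rw [if_pos h2, if_pos h2, ih _ _ _ _ (by omega)]
        · rw [if_neg h2, if_neg h2]
          by_cases h3 : cs.getD i ' ' = q
          · rw [if_pos h3, if_pos h3, ih _ _ _ _ (by omega)]
          · rw [if_neg h3, if_neg h3, ih _ _ _ _ (by omega)]
    | line =>
      simp only
      by_cases h1 : cs.getD i ' ' = '\n'
      · rw [if_pos h1, if_pos h1, ih _ _ _ _ (by omega)]
      · rw [if_neg h1, if_neg h1, ih _ _ _ _ (by omega)]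
    | block star =>
      simp only
      by_cases h1 : star = true ∧ cs.getD i ' ' = '/'
      · rw [if_pos h1, if_pos h1, ih _ _ _ _ (by omega)]
      · rw [if_neg h1, if_neg h1, ih _ _ _ _ (by omega)]

-- The simulation invariant: B's flat loop in each state equals A's corresponding
-- skip-loop-then-main-loop composition, at every index j.
def Sim (cs : List Char) (j : Nat) : Prop :=
  ∀ (count : Int) (events : List (Int × String × Int)) (q : Char),
    (bLoopW cs j count events .normal = aMainW cs j count events) ∧
    (bLoopW cs j count events (.str q false) = aMainW cs (aStrW cs q j) count events) ∧
    (bLoopW cs j count events (.str q true) = aMainW cs (aStrW cs q (j + 1)) count events) ∧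
    (bLoopW cs j count events .line = aMainW cs (aLineW cs j) count events) ∧
    (bLoopW cs j count events (.block false) = aMainW cs (aBlockScanW cs j + 2) count events) ∧
    (1 ≤ j → cs.getD (j - 1) ' ' = '*' →
      bLoopW cs j count events (.block true) = aMainW cs (aBlockScanW cs (j - 1) + 2) count events)

theorem sim_of_ge (cs : List Char) (j : Nat) (h : cs.length ≤ j) : Sim cs j := by
  intro count events q
  refine ⟨?_, ?_, ?_, ?_, ?_, ?_⟩
  · rw [bLoopW_stop _ _ _ _ _ h, aMainW_stop _ _ _ _ h]
  · rw [bLoopW_stop _ _ _ _ _ h, aStrW_stop _ _ _ h, aMainW_stop _ _ _ _ h]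
  · rw [bLoopW_stop _ _ _ _ _ h, aStrW_stop _ _ _ (by omega), aMainW_stop _ _ _ _ (by omega)]
  · rw [bLoopW_stop _ _ _ _ _ h, aLineW_stop _ _ h, aMainW_stop _ _ _ _ h]
  · rw [bLoopW_stop _ _ _ _ _ h, aBlockScanW_stop _ _ (by omega), aMainW_stop _ _ _ _ (by omega)]
  · intro h1 _
    rw [bLoopW_stop _ _ _ _ _ h, aBlockScanW_stop _ _ (by omega), aMainW_stop _ _ _ _ (by omega)]

theorem sim_all (cs : List Char) : ∀ (n j : Nat), cs.length - j ≤ n → Sim cs j := by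
  intro n
  induction n with
  | zero =>
    intro j hj
    exact sim_of_ge cs j (by omega)
  | succ n ih =>
    intro j hj
    by_cases hjL : j < cs.length
    case neg => exact sim_of_ge cs j (by omega)
    case pos =>
    have ih1 : Sim cs (j + 1) := ih (j + 1) (by omega)
    have ih2 : Sim cs (j + 2) := ih (j + 2) (by omega)
    intro count events q
    set c := cs.getD j ' ' with hc
    refine ⟨?_, ?_, ?_, ?_, ?_, ?_⟩
    -- normal
    · rw [bLoopW, aMainW]
      simp only [dif_pos hjL, ← hc]
      by_cases h1 : c = '"' ∨ c = '\'' ∨ c = '`'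
      · rw [if_pos h1, if_pos h1]
        exact (ih1 count events c).2.1
      · rw [if_neg h1, if_neg h1]
        by_cases h2 : c = '/' ∧ j + 1 < cs.length ∧ cs.getD (j + 1) ' ' = '/'
        · rw [if_pos h2, if_pos h2]
          exact (ih2 count events q).2.2.2.1
        · rw [if_neg h2, if_neg h2]
          by_cases h3 : c = '/' ∧ j + 1 < cs.length ∧ cs.getD (j + 1) ' ' = '*'
          · rw [if_pos h3, if_pos h3]
            exact (ih2 count events q).2.2.2.2.1
          · rw [if_neg h3, if_neg h3]
            by_cases h4 : c = '{'
            · rw [if_pos h4, if_pos h4]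
              exact (ih1 (count + 1) (events ++ [((j : Int), "{", count + 1)]) q).1
            · rw [if_neg h4, if_neg h4]
              by_cases h5 : c = '}'
              · rw [if_pos h5, if_pos h5]
                exact (ih1 (count - 1) (events ++ [((j : Int), "}", count - 1)]) q).1
              · rw [if_neg h5, if_neg h5]
                exact (ih1 count events q).1
    -- string, esc = false
    · rw [bLoopW, aStrW]
      simp only [dif_pos hjL, if_pos hjL, ← hc]
      by_cases h1 : c = '\\'
      · rw [if_pos h1, if_pos h1]
        exact (ih1 count events q).2.2.1
      · rw [if_neg h1, if_neg h1]
        by_cases h2 : c = q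
        · rw [if_pos h2, if_pos h2]
          exact (ih1 count events q).1
        · rw [if_neg h2, if_neg h2]
          exact (ih1 count events q).2.1
    -- string, esc = true
    · rw [bLoopW]
      simp only [dif_pos hjL]
      rw [if_pos trivial]
      exact (ih1 count events q).2.1
    -- line comment
    · rw [bLoopW, aLineW]
      simp only [dif_pos hjL, ← hc]
      by_cases h1 : c = '\n'
      · rw [if_pos h1, if_neg (by simp [h1])]
        rw [(ih1 count events q).1]
        have hA : aMainW cs j count events = aMainW cs (j + 1) count events := by
          conv_lhs => rw [aMainW]
          rw [dif_pos hjL]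
          simp only [← hc, h1]
          rw [if_neg (by decide), if_neg (fun h => absurd h.1 (by decide)),
            if_neg (fun h => absurd h.1 (by decide)), if_neg (by decide), if_neg (by decide)]
        exact hA.symm
      · rw [if_neg h1, if_pos ⟨hjL, h1⟩]
        exact (ih1 count events q).2.2.2.1
    -- block comment, star = false
    · rw [bLoopW]
      simp only [dif_pos hjL, ← hc]
      rw [if_neg (by simp)]
      by_cases h1 : c = '*'
      · have hb : bLoopW cs (j + 1) count events (.block (c = '*'))
            = bLoopW cs (j + 1) count events (.block true) := by simp [h1]
        rw [hb]
        have := (ih1 count events q).2.2.2.2.2 (by omega)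
          (by simp only [Nat.add_sub_cancel]; rw [← hc]; exact h1)
        simpa using this
      · have hb : bLoopW cs (j + 1) count events (.block (c = '*'))
            = bLoopW cs (j + 1) count events (.block false) := by
          simp [h1]
        rw [hb, (ih1 count events q).2.2.2.2.1]
        by_cases h2 : j + 1 < cs.length
        · have : aBlockScanW cs j = aBlockScanW cs (j + 1) := by
            rw [aBlockScanW]
            rw [if_pos ⟨h2, fun hcon => h1 (by rw [hc]; exact hcon.1)⟩]
          rw [this]
        · have e1 : aBlockScanW cs j = j := aBlockScanW_stop _ _ (by omega)
          have e2 : aBlockScanW cs (j + 1) = j + 1 := aBlockScanW_stop _ _ (by omega)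
          rw [e1, e2, aMainW_stop _ _ _ _ (by omega), aMainW_stop _ _ _ _ (by omega)]
    -- block comment, star = true
    · intro hj1 hstar
      rw [bLoopW]
      simp only [dif_pos hjL, ← hc]
      by_cases h1 : c = '/'
      · rw [if_pos ⟨trivial, h1⟩]
        have hscan : aBlockScanW cs (j - 1) = j - 1 := by
          rw [aBlockScanW, if_neg]
          intro hcon
          have hj' : j - 1 + 1 = j := by omega
          rw [hj'] at hcon
          exact hcon.2 ⟨hstar, hc.symm.trans h1⟩
        rw [hscan]
        have hj' : j - 1 + 2 = j + 1 := by omega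
        rw [hj']
        exact (ih1 count events q).1
      · rw [if_neg (by simp [h1])]
        have hscan : aBlockScanW cs (j - 1) = aBlockScanW cs j := by
          rw [aBlockScanW]
          rw [if_pos]
          · congr 1; omega
          · constructor
            · omega
            · intro hcon
              have hj' : j - 1 + 1 = j := by omega
              rw [hj'] at hcon
              exact h1 (by rw [hc]; exact hcon.2)
        rw [hscan]
        by_cases h2 : c = '*'
        · have hb : bLoopW cs (j + 1) count events (.block (c = '*'))
              = bLoopW cs (j + 1) count events (.block true) := by simp [h2]
          rw [hb]
          have := (ih1 count events q).2.2.2.2.2 (by omega)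
            (by simp only [Nat.add_sub_cancel]; rw [← hc]; exact h2)
          simpa using this
        · have hb : bLoopW cs (j + 1) count events (.block (c = '*'))
              = bLoopW cs (j + 1) count events (.block false) := by
            simp [h2]
          rw [hb, (ih1 count events q).2.2.2.2.1]
          by_cases h3 : j + 1 < cs.length
          · have : aBlockScanW cs j = aBlockScanW cs (j + 1) := by
              rw [aBlockScanW]
              rw [if_pos ⟨h3, fun hcon => h2 (by rw [hc]; exact hcon.1)⟩]
            rw [this]
          · have e1 : aBlockScanW cs j = j := aBlockScanW_stop _ _ (by omega)
            have e2 : aBlockScanW cs (j + 1) = j + 1 := aBlockScanW_stop _ _ (by omega)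
            rw [e1, e2, aMainW_stop _ _ _ _ (by omega), aMainW_stop _ _ _ _ (by omega)]

-- ===== VERDICT (by name: the statement is the Claim_ definition above) =====
theorem compute_spec : Claim_equal_compute := by
  intro js _
  unfold Spec_compute compute compute_alt
  rw [aMain_eq js.toList (js.toList.length + 1) 0 0 [] (by omega),
    bLoop_eq js.toList (js.toList.length + 1) 0 0 [] .normal (by omega)]
  exact ((sim_all js.toList js.toList.length 0 (by omega)) 0 [] ' ').1.symm
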